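-- pv_equiv track=rewrite | github.com/ParagonHack/Paragon_Backend | Scraping/parser.py | getLinkDict
-- ===== SOURCE A (Python) =====
-- def getLinkDict(linkList: list) -> dict:
--     values={"tiktok":[],"instagram":[], "youtube": []}
--     for item in linkList:
--         if item.startswith('https://www.instagram.com'):
--             values['instagram'].append(item)
--         elif item.startswith('https://www.tiktok.com') or item.startswith('https://m.tiktok.com'):
--             values['tiktok'].append(item)
--         elif item.startswith('https://www.youtube.com'):
--             values['youtube'].append(item)
--     return values
-- ===== SOURCE B (Python) =====
-- PLATFORM_PREFIXES = [
--     ("tiktok", ("https://www.tiktok.com", "https://m.tiktok.com")),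
--     ("instagram", ("https://www.instagram.com",)),
--     ("youtube", ("https://www.youtube.com",)),
-- ]
--
--
-- def getLinkDict(linkList: list) -> dict:
--     return {
--         platform: [item for item in linkList if item.startswith(prefixes)]
--         for platform, prefixes in PLATFORM_PREFIXES
--     }
-- ===== Notes on version B (the rewrite author's own statement) =====
-- stated objective: idiomatic
-- what changed: Replaces A's single loop with imperative branch-and-append over a mutable dict by a prefix-to-platform table and a dict comprehension that builds each bucket with one filter pass per platform.
import Mathlib
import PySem

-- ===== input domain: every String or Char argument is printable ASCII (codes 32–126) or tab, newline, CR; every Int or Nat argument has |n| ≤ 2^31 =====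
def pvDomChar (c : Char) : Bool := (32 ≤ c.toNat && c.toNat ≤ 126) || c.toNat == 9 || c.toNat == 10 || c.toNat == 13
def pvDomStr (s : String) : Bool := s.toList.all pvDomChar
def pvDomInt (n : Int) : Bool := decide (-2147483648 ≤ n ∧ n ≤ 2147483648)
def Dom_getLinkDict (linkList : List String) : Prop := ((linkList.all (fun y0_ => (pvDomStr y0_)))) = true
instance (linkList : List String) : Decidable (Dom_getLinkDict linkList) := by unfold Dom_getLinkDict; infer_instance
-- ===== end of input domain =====

-- B replaces A's single loop with branch-and-append by one filter pass per platform over a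
-- prefix table (idiomatic dict comprehension); same cost, no speed claim.

-- ===== PORT A =====
-- one loop iteration of A: first matching startswith branch appends to that platform's list
def pvAStep (d : PySem.Dict String (List String)) (item : String) : PySem.Dict String (List String) :=
  if PySem.Str.startswith item "https://www.instagram.com" then
    d.modify "instagram" [] (· ++ [item])
  else if PySem.Str.startswith item "https://www.tiktok.com" || PySem.Str.startswith item "https://m.tiktok.com" then
    d.modify "tiktok" [] (· ++ [item])
  else if PySem.Str.startswith item "https://www.youtube.com" then
    d.modify "youtube" [] (· ++ [item])
  else d

def getLinkDict (linkList : List String) : List (String × List String) :=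
  let values : PySem.Dict String (List String) :=
    ((PySem.Dict.empty.insert "tiktok" []).insert "instagram" []).insert "youtube" []
  (linkList.foldl pvAStep values).items

-- ===== PORT B =====
-- the ordered prefix → platform table of Source B
def pvPlatformPrefixes : List (String × List String) :=
  [("tiktok", ["https://www.tiktok.com", "https://m.tiktok.com"]),
   ("instagram", ["https://www.instagram.com"]),
   ("youtube", ["https://www.youtube.com"])]

def getLinkDict_alt (linkList : List String) : List (String × List String) :=
  pvPlatformPrefixes.map (fun pp =>
    (pp.1, linkList.filter (fun item => pp.2.any (fun p => PySem.Str.startswith item p))))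

-- ===== PRECONDITION & SPEC =====
def Spec_getLinkDict (linkList : List String) (out : List (String × List String)) : Prop := out = getLinkDict_alt linkList
instance (linkList : List String) (out : List (String × List String)) : Decidable (Spec_getLinkDict linkList out) := by unfold Spec_getLinkDict; infer_instance

-- ===== CLAIM (what is proved, stated in full; the proofs are below) =====
def Claim_equal_getLinkDict : Prop := ∀ (linkList : List String), Dom_getLinkDict linkList → Spec_getLinkDict linkList (getLinkDict linkList)

-- ===== LEMMAS AND PROOFS =====

-- B's three membership predicates
def pvIsTik (s : String) : Bool :=
  PySem.Str.startswith s "https://www.tiktok.com" || PySem.Str.startswith s "https://m.tiktok.com"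
def pvIsIG (s : String) : Bool := PySem.Str.startswith s "https://www.instagram.com"
def pvIsYT (s : String) : Bool := PySem.Str.startswith s "https://www.youtube.com"

-- two prefixes of the same string are comparable; none of A's four prefix literals
-- is a prefix of another, so the three platform predicates are pairwise exclusive
lemma pv_not_both (s : String) (p q : String)
    (h : ¬ p.toList <+: q.toList) (h2 : ¬ q.toList <+: p.toList)
    (hp : PySem.Str.startswith s p = true) : PySem.Str.startswith s q = false := by
  by_contra hq
  rw [Bool.not_eq_false] at hq
  rw [PySem.Str.startswith_eq, PySem.Chars.startswith_iff] at hp hq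
  rcases List.prefix_or_prefix_of_prefix hp hq with h' | h' <;> contradiction

lemma pv_ig_not_tik (s : String) (h : pvIsIG s = true) : pvIsTik s = false := by
  unfold pvIsIG at h
  unfold pvIsTik
  rw [pv_not_both s _ _ (by decide) (by decide) h, pv_not_both s _ _ (by decide) (by decide) h]
  rfl

lemma pv_ig_not_yt (s : String) (h : pvIsIG s = true) : pvIsYT s = false :=
  pv_not_both s _ _ (by decide) (by decide) h

lemma pv_tik_not_yt (s : String) (h : pvIsTik s = true) : pvIsYT s = false := by
  unfold pvIsTik at h
  rcases Bool.or_eq_true_iff.mp h with h' | h' <;>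
    exact pv_not_both s _ _ (by decide) (by decide) h'




-- B's map over the table, written with the three named predicates
lemma pv_alt_eq (l : List String) :
    getLinkDict_alt l = [("tiktok", l.filter pvIsTik),
                         ("instagram", l.filter pvIsIG),
                         ("youtube", l.filter pvIsYT)] := by
  unfold getLinkDict_alt pvPlatformPrefixes
  simp only [List.map]
  have h1 : l.filter (fun item => (["https://www.tiktok.com", "https://m.tiktok.com"] : List String).any
      (fun p => PySem.Str.startswith item p)) = l.filter pvIsTik :=
    List.filter_congr (fun x _ => by simp [pvIsTik])
  have h2 : l.filter (fun item => (["https://www.instagram.com"] : List String).any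
      (fun p => PySem.Str.startswith item p)) = l.filter pvIsIG :=
    List.filter_congr (fun x _ => by simp [pvIsIG])
  have h3 : l.filter (fun item => (["https://www.youtube.com"] : List String).any
      (fun p => PySem.Str.startswith item p)) = l.filter pvIsYT :=
    List.filter_congr (fun x _ => by simp [pvIsYT])
  rw [h1, h2, h3]

-- loop invariant: A's fold from any three-bucket state appends exactly B's filters
lemma pv_fold_inv (l : List String) (a b c : List String) :
    (l.foldl pvAStep (PySem.Dict.mk [("tiktok", a), ("instagram", b), ("youtube", c)])).items
      = [("tiktok", a ++ l.filter pvIsTik),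
         ("instagram", b ++ l.filter pvIsIG),
         ("youtube", c ++ l.filter pvIsYT)] := by
  induction l generalizing a b c with
  | nil => simp
  | cons x xs ih =>
    simp only [List.foldl_cons]
    by_cases hig : pvIsIG x = true
    · have ht := pv_ig_not_tik x hig
      have hy := pv_ig_not_yt x hig
      have hstep : pvAStep (PySem.Dict.mk [("tiktok", a), ("instagram", b), ("youtube", c)]) x
          = PySem.Dict.mk [("tiktok", a), ("instagram", b ++ [x]), ("youtube", c)] := by
        unfold pvAStep
        rw [if_pos (by exact hig)]
        simp [PySem.Dict.modify, PySem.Dict.get?, PySem.Dict.insert, PySem.Dict.getD]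
      rw [hstep, ih]
      simp [hig, ht, hy]
    · by_cases htk : pvIsTik x = true
      · have hy := pv_tik_not_yt x htk
        have hstep : pvAStep (PySem.Dict.mk [("tiktok", a), ("instagram", b), ("youtube", c)]) x
            = PySem.Dict.mk [("tiktok", a ++ [x]), ("instagram", b), ("youtube", c)] := by
          unfold pvAStep
          rw [if_neg (by simpa [pvIsIG] using hig), if_pos (by simpa [pvIsTik] using htk)]
          simp [PySem.Dict.modify, PySem.Dict.get?, PySem.Dict.insert, PySem.Dict.getD]
        rw [hstep, ih]
        simp [htk, hy, hig]
      · by_cases hyt : pvIsYT x = true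
        · have hstep : pvAStep (PySem.Dict.mk [("tiktok", a), ("instagram", b), ("youtube", c)]) x
              = PySem.Dict.mk [("tiktok", a), ("instagram", b), ("youtube", c ++ [x])] := by
            unfold pvAStep
            rw [if_neg (by simpa [pvIsIG] using hig), if_neg (by simpa [pvIsTik] using htk),
              if_pos (by exact hyt)]
            simp [PySem.Dict.modify, PySem.Dict.get?, PySem.Dict.insert, PySem.Dict.getD]
          rw [hstep, ih]
          simp [hyt, hig, htk]
        · have hstep : pvAStep (PySem.Dict.mk [("tiktok", a), ("instagram", b), ("youtube", c)]) x
              = PySem.Dict.mk [("tiktok", a), ("instagram", b), ("youtube", c)] := by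
            unfold pvAStep
            rw [if_neg (by simpa [pvIsIG] using hig), if_neg (by simpa [pvIsTik] using htk),
              if_neg (by simpa [pvIsYT] using hyt)]
          rw [hstep, ih]
          simp [hig, htk, hyt]

-- ===== VERDICT (by name: the statement is the Claim_ definition above) =====
theorem getLinkDict_spec : Claim_equal_getLinkDict := by
  intro linkList _
  show getLinkDict linkList = getLinkDict_alt linkList
  rw [pv_alt_eq]
  unfold getLinkDict
  have hinit : ((PySem.Dict.empty.insert "tiktok" ([] : List String)).insert "instagram" []).insert "youtube" []
      = PySem.Dict.mk [("tiktok", []), ("instagram", []), ("youtube", [])] := by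
    decide
  rw [hinit, pv_fold_inv]
  simp
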